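-- pv_equiv track=rewrite | github.com/goldenfamilyfarms/correlation-station | .archive/sense-apps/palantir/tests/test_v3_circuit_test.py | get_single_side_devices
-- ===== SOURCE A (Python) =====
-- def get_single_side_devices(devices):
--     one_side_only = []
--     for device in devices:
--         if not device["split_id"]:
--             one_side_only.append(device)
--         if device["split_id"]:
--             break
--     return one_side_only
-- ===== SOURCE B (Python) =====
-- def get_single_side_devices(devices):
--     idx = next((i for i, d in enumerate(devices) if d["split_id"]), len(devices))
--     return devices[:idx]
-- ===== Notes on version B (the rewrite author's own statement) =====
-- stated objective: simpler
-- what changed: B computes the boundary index of the first device with a truthy split_id up front (next over enumerate) and returns one bulk slice devices[:idx], instead of A's element-by-element append loop with a break.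
import Mathlib
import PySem

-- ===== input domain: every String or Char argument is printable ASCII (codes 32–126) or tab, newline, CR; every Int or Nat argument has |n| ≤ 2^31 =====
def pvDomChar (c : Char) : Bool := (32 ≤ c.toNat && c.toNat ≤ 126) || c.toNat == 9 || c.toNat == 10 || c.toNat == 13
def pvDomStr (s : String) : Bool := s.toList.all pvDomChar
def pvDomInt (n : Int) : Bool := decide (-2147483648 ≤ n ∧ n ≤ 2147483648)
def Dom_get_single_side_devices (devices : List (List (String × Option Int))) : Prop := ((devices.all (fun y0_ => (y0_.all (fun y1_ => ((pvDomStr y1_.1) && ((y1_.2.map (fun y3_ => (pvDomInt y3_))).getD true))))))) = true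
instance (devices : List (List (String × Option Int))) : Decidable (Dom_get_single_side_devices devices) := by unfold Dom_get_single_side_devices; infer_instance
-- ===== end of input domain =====

-- B replaces A's append-loop-with-break by computing the first truthy-split_id index up front and returning one bulk slice (objective: simpler).

-- shared helper: Python truthiness of device["split_id"] (None and 0 are falsy); missing key = KeyError, excluded by Pre_
def pvTruthy (d : List (String × Option Int)) : Bool :=
  match (PySem.Dict.mk d).get? "split_id" with
  | some (some n) => n != 0
  | _ => false

-- ===== PORT A =====
def get_single_side_devices (devices : List (List (String × Option Int))) : List (List (String × Option Int)) :=
  match devices with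
  | [] => []
  | d :: rest =>
      -- if not device["split_id"]: append; if device["split_id"]: break
      if pvTruthy d then [] else d :: get_single_side_devices rest

-- ===== PORT B =====
def get_single_side_devices_alt (devices : List (List (String × Option Int))) : List (List (String × Option Int)) :=
  let idx := devices.findIdx pvTruthy   -- next((i for i, d in enumerate(devices) if d["split_id"]), len(devices))
  devices.take idx                      -- devices[:idx]

-- ===== PRECONDITION & SPEC =====
-- Pre_ excludes exactly the inputs on which Python A raises KeyError: a device actually reached
-- by the loop (all earlier devices have falsy split_id) that lacks the "split_id" key. B raises there too.
def Pre_get_single_side_devices (devices : List (List (String × Option Int))) : Prop :=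
  ∀ i < devices.length, (∀ j < i, pvTruthy (devices.getD j []) = false) →
    ((PySem.Dict.mk (devices.getD i [])).get? "split_id").isSome = true
instance (devices : List (List (String × Option Int))) : Decidable (Pre_get_single_side_devices devices) := by unfold Pre_get_single_side_devices; infer_instance
def pvWitness_get_single_side_devices : (List (List (String × Option Int))) :=
  [[("split_id", none)], [("split_id", some 3)], [("name", some 1)]]
def Spec_get_single_side_devices (devices : List (List (String × Option Int))) (out : List (List (String × Option Int))) : Prop := out = get_single_side_devices_alt devices
instance (devices : List (List (String × Option Int))) (out : List (List (String × Option Int))) : Decidable (Spec_get_single_side_devices devices out) := by unfold Spec_get_single_side_devices; infer_instance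

-- ===== CLAIM (what is proved, stated in full; the proofs are below) =====
def Claim_equal_get_single_side_devices : Prop := ∀ (devices : List (List (String × Option Int))), Dom_get_single_side_devices devices → Pre_get_single_side_devices devices → Spec_get_single_side_devices devices (get_single_side_devices devices)

-- ===== LEMMAS AND PROOFS =====
theorem pv_ports_agree (devices : List (List (String × Option Int))) :
    get_single_side_devices devices = get_single_side_devices_alt devices := by
  induction devices with
  | nil => rfl
  | cons d rest ih =>
      simp only [get_single_side_devices, get_single_side_devices_alt, List.findIdx_cons]
      by_cases h : pvTruthy d
      · simp [h]
      · simp only [h, if_neg, Bool.false_eq_true, not_false_eq_true, cond_false,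
          List.take_succ_cons, List.cons.injEq, true_and]
        simpa [get_single_side_devices_alt] using ih

-- ===== VERDICT (by name: the statement is the Claim_ definition above) =====
theorem get_single_side_devices_spec : Claim_equal_get_single_side_devices := by
  intro devices _ _
  exact (pv_ports_agree devices).symm ▸ rfl
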